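-- pv_equiv track=rewrite | github.com/rnabioco/aa-tRNA-seq-pipeline | workflow/scripts/add_sb_tags.py | calculate_samples_per_base
-- ===== SOURCE A (Python) =====
-- def calculate_samples_per_base(mv_array):
--     samples_per_base = []
--     sample_count = 0
--     stride_length = mv_array[0]
--     for value in mv_array[1:]:
--         if value == 1:
--             if sample_count > 0:
--                 samples_per_base.append(sample_count)
--             sample_count = stride_length
--         else:
--             sample_count += stride_length
--     if sample_count > 0:
--         samples_per_base.append(sample_count)
--     return samples_per_base
-- ===== SOURCE B (Python) =====
-- def calculate_samples_per_base(mv_array):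
--     stride = mv_array[0]
--     moves = mv_array[1:]
--     positions = [i for i, v in enumerate(moves) if v == 1]
--     if positions:
--         lengths = ([positions[0]]
--                    + [b - a for a, b in zip(positions, positions[1:])]
--                    + [len(moves) - positions[-1]])
--     else:
--         lengths = [len(moves)]
--     return [L * stride for L in lengths if L * stride > 0]
-- ===== Notes on version B (the rewrite author's own statement) =====
-- stated objective: alternative
-- what changed: Replaces A's accumulate-and-reset running-counter loop with an index-then-gaps computation: collect the positions of 1s in mv_array[1:], derive segment lengths from consecutive differences, and scale by the stride with a positivity filter.
import Mathlib
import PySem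

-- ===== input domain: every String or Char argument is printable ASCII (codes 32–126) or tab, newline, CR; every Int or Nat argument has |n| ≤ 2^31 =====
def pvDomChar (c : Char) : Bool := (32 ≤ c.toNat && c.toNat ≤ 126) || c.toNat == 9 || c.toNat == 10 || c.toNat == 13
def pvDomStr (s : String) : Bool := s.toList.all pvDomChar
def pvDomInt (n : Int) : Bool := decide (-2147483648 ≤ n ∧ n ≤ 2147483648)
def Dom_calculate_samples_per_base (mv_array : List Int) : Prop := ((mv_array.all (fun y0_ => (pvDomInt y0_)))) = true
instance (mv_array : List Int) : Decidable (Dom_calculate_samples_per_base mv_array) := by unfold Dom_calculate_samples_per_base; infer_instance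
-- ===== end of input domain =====

-- B computes the same samples-per-base list via the positions of 1s and their gap differences instead of A's running-counter loop; same O(n) cost (objective: alternative).

-- ===== PORT A =====
-- loop body of A's for-loop over mv_array[1:]
def pvStepA (stride : Int) (st : List Int × Int) (value : Int) : List Int × Int :=
  if value == 1 then
    ((if st.2 > 0 then st.1 ++ [st.2] else st.1), stride)
  else
    (st.1, st.2 + stride)

def calculate_samples_per_base (mv_array : List Int) : List Int :=
  match mv_array with
  | [] => []  -- Python raises IndexError reading the first element; excluded by Pre_
  | stride_length :: rest =>
    let st := rest.foldl (pvStepA stride_length) ([], 0)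
    if st.2 > 0 then st.1 ++ [st.2] else st.1

-- ===== PORT B =====
-- consecutive differences  [b - a for a, b in zip(ps, ps[1:])]
def pvDiffs (ps : List Int) : List Int := (ps.zip ps.tail).map (fun q => q.2 - q.1)

-- lengths = [ps[0]] + diffs + [n - ps[-1]]   (or [n] when ps is empty)
def pvLens (n : Int) (ps : List Int) : List Int :=
  match ps with
  | [] => [n]
  | p :: tl => ([p] ++ pvDiffs (p :: tl)) ++ [n - (p :: tl).getLast (List.cons_ne_nil p tl)]

def calculate_samples_per_base_alt (mv_array : List Int) : List Int :=
  match mv_array with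
  | [] => []  -- Python raises IndexError reading the first element; excluded by Pre_
  | stride :: moves =>
    let positions := ((PySem.List.enumerate moves).filter (fun p => p.2 == 1)).map (fun p => p.1)
    (pvLens (moves.length : Int) positions).filterMap
      (fun L => if L * stride > 0 then some (L * stride) else none)

-- ===== PRECONDITION & SPEC =====
-- Pre_ excludes only the empty list, on which the Python A (and B) raise IndexError reading the first element.
def Pre_calculate_samples_per_base (mv_array : List Int) : Prop := mv_array ≠ []
instance (mv_array : List Int) : Decidable (Pre_calculate_samples_per_base mv_array) := by unfold Pre_calculate_samples_per_base; infer_instance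
def pvWitness_calculate_samples_per_base : List Int := [2, 1, 0, 1]

def Spec_calculate_samples_per_base (mv_array : List Int) (out : List Int) : Prop := out = calculate_samples_per_base_alt mv_array
instance (mv_array : List Int) (out : List Int) : Decidable (Spec_calculate_samples_per_base mv_array out) := by unfold Spec_calculate_samples_per_base; infer_instance

-- ===== CLAIM (what is proved, stated in full; the proofs are below) =====
def Claim_equal_calculate_samples_per_base : Prop := ∀ (mv_array : List Int), Dom_calculate_samples_per_base mv_array → Pre_calculate_samples_per_base mv_array → Spec_calculate_samples_per_base mv_array (calculate_samples_per_base mv_array)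

-- ===== LEMMAS AND PROOFS =====

-- reference recursion: segment sample counts with pending count c
def pvSegs (stride : Int) : List Int → Int → List Int
  | [], c => if c > 0 then [c] else []
  | v :: ms, c =>
    if v = 1 then (if c > 0 then [c] else []) ++ pvSegs stride ms stride
    else pvSegs stride ms (c + stride)

-- reference recursion: segment lengths with pending length p
def pvRecLens : List Int → Int → List Int
  | [], p => [p]
  | v :: ms, p => if v = 1 then p :: pvRecLens ms 1 else pvRecLens ms (p + 1)

def pvAddHead (k : Int) : List Int → List Int
  | [] => []
  | x :: xs => (x + k) :: xs

def pvPos (s : Int) (ms : List Int) : List Int :=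
  ((PySem.List.enumerate ms s).filter (fun p => p.2 == 1)).map (fun p => p.1)

def pvBL (ms : List Int) : List Int := pvLens (ms.length : Int) (pvPos 0 ms)

theorem pvA_fold (stride : Int) : ∀ (ms acc : List Int) (c : Int),
    (if (ms.foldl (pvStepA stride) (acc, c)).2 > 0
      then (ms.foldl (pvStepA stride) (acc, c)).1 ++ [(ms.foldl (pvStepA stride) (acc, c)).2]
      else (ms.foldl (pvStepA stride) (acc, c)).1) = acc ++ pvSegs stride ms c := by
  intro ms
  induction ms with
  | nil => intro acc c; simp only [List.foldl_nil, pvSegs]; split_ifs <;> simp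
  | cons v ms ih =>
    intro acc c
    rw [List.foldl_cons]
    by_cases hv : v = 1
    · have hstep : pvStepA stride (acc, c) v = ((if c > 0 then acc ++ [c] else acc), stride) := by
        simp [pvStepA, hv]
      rw [hstep, ih]
      simp only [pvSegs, hv, if_pos]
      split_ifs <;> simp
    · have hstep : pvStepA stride (acc, c) v = (acc, c + stride) := by
        simp [pvStepA, hv]
      rw [hstep, ih]
      simp [pvSegs, hv]

theorem pvPos_shift (ms : List Int) : ∀ (s t : Int),
    pvPos (s + t) ms = (pvPos s ms).map (· + t) := by
  induction ms with
  | nil => intro s t; simp [pvPos, PySem.List.enumerate_nil]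
  | cons v ms ih =>
    intro s t
    have e : s + t + 1 = (s + 1) + t := by ring
    by_cases hv : v = 1
    · simp only [pvPos, PySem.List.enumerate_cons, List.filter_cons] at *
      simp [hv, e, ih (s + 1) t]
    · simp only [pvPos, PySem.List.enumerate_cons, List.filter_cons] at *
      simp [hv, e, ih (s + 1) t]

theorem pvPos_cons (v : Int) (ms : List Int) :
    pvPos 0 (v :: ms) = (if v = 1 then [(0 : Int)] else []) ++ (pvPos 0 ms).map (· + 1) := by
  have h : pvPos 1 ms = (pvPos 0 ms).map (· + 1) := by
    have := pvPos_shift ms 0 1; simpa using this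
  have h2 : pvPos 0 (v :: ms) = (if v = 1 then [(0 : Int)] else []) ++ pvPos 1 ms := by
    simp only [pvPos, PySem.List.enumerate_cons, List.filter_cons]
    by_cases hv : v = 1 <;> simp [hv, pvPos]
  rw [h2, h]

theorem pvDiffs_cons₂ (x y : Int) (l : List Int) :
    pvDiffs (x :: y :: l) = (y - x) :: pvDiffs (y :: l) := by
  simp [pvDiffs]

theorem pvDiffs_map : ∀ (l : List Int), pvDiffs (l.map (· + 1)) = pvDiffs l := by
  intro l
  induction l with
  | nil => simp [pvDiffs]
  | cons x tl ih =>
    cases tl with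
    | nil => simp [pvDiffs]
    | cons y tl2 =>
      simp only [List.map_cons] at ih ⊢
      rw [pvDiffs_cons₂, pvDiffs_cons₂, ih]
      ring_nf

-- pvLens with the dependent getLast replaced by getLast?.getD
theorem pvLens_cons (n p : Int) (tl : List Int) :
    pvLens n (p :: tl) = ([p] ++ pvDiffs (p :: tl)) ++ [n - ((p :: tl).getLast?).getD 0] := by
  have h := List.getLast?_eq_getLast_of_ne_nil (l := p :: tl) (List.cons_ne_nil p tl)
  simp only [pvLens, h, Option.getD_some]

theorem pvLens_shift (n : Int) (ps : List Int) :
    pvLens (n + 1) (ps.map (· + 1)) = pvAddHead 1 (pvLens n ps) := by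
  cases ps with
  | nil => simp [pvLens, pvAddHead]
  | cons p tl =>
    rw [List.map_cons, pvLens_cons, pvLens_cons]
    have hd : pvDiffs ((p + 1) :: tl.map (· + 1)) = pvDiffs (p :: tl) := by
      have := pvDiffs_map (p :: tl); simpa using this
    have hl : (((p + 1) :: tl.map (· + 1)).getLast?) = ((p :: tl).getLast?).map (· + 1) := by
      have := List.getLast?_map (f := (· + (1 : Int))) (l := p :: tl); simpa using this
    obtain ⟨g, hg⟩ : ∃ g, (p :: tl).getLast? = some g :=
      ⟨_, List.getLast?_eq_getLast_of_ne_nil (List.cons_ne_nil p tl)⟩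
    rw [hd, hl, hg]
    simp [pvAddHead] <;> ring_nf

theorem pvBL_nil : pvBL [] = [0] := by decide

theorem pvBL_one (ms : List Int) : pvBL (1 :: ms) = 0 :: pvAddHead 1 (pvBL ms) := by
  have hpos : pvPos 0 ((1 : Int) :: ms) = 0 :: (pvPos 0 ms).map (· + 1) := by
    rw [pvPos_cons]; simp
  have hn : ((((1 : Int) :: ms).length : Nat) : Int) = (ms.length : Int) + 1 := by
    simp [List.length_cons]
  unfold pvBL
  rw [hpos, hn]
  cases hps : pvPos 0 ms with
  | nil => simp [pvLens, pvDiffs, pvAddHead]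
  | cons q tl =>
    rw [List.map_cons, pvLens_cons, pvLens_cons]
    rw [pvDiffs_cons₂]
    have hd : pvDiffs ((q + 1) :: tl.map (· + 1)) = pvDiffs (q :: tl) := by
      have := pvDiffs_map (q :: tl); simpa using this
    have hl : (((0 : Int)) :: (q + 1) :: tl.map (· + 1)).getLast? = ((q :: tl).getLast?).map (· + 1) := by
      rw [List.getLast?_cons_cons]
      have := List.getLast?_map (f := (· + (1 : Int))) (l := q :: tl); simpa using this
    obtain ⟨g, hg⟩ : ∃ g, (q :: tl).getLast? = some g :=
      ⟨_, List.getLast?_eq_getLast_of_ne_nil (List.cons_ne_nil q tl)⟩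
    rw [hd, hl, hg]
    simp [pvAddHead] <;> constructor <;> ring_nf

theorem pvBL_notone (v : Int) (hv : v ≠ 1) (ms : List Int) :
    pvBL (v :: ms) = pvAddHead 1 (pvBL ms) := by
  have hpos : pvPos 0 (v :: ms) = (pvPos 0 ms).map (· + 1) := by
    rw [pvPos_cons]; simp [hv]
  have hn : (((v :: ms).length : Nat) : Int) = (ms.length : Int) + 1 := by
    simp [List.length_cons]
  unfold pvBL
  rw [hpos, hn, pvLens_shift]

theorem pvAddHead_add (p k : Int) (l : List Int) :
    pvAddHead p (pvAddHead k l) = pvAddHead (k + p) l := by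
  cases l <;> simp [pvAddHead] <;> ring

theorem pvRecLens_eq_BL : ∀ (ms : List Int) (p : Int),
    pvRecLens ms p = pvAddHead p (pvBL ms) := by
  intro ms
  induction ms with
  | nil => intro p; simp [pvRecLens, pvBL_nil, pvAddHead]
  | cons v ms ih =>
    intro p
    by_cases hv : v = 1
    · subst hv
      simp only [pvRecLens, if_pos rfl, pvBL_one]
      rw [ih 1]
      simp [pvAddHead]
    · simp only [pvRecLens, hv, ite_false, pvBL_notone v hv]
      rw [ih (p + 1), pvAddHead_add]
      ring_nf

theorem pvSegs_eq_filt (stride : Int) : ∀ (ms : List Int) (p : Int),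
    pvSegs stride ms (p * stride) =
      (pvRecLens ms p).filterMap (fun L => if L * stride > 0 then some (L * stride) else none) := by
  intro ms
  induction ms with
  | nil =>
    intro p
    simp only [pvSegs, pvRecLens, List.filterMap_cons, List.filterMap_nil]
    split_ifs <;> simp
  | cons v ms ih =>
    intro p
    by_cases hv : v = 1
    · simp only [pvSegs, pvRecLens, hv, if_pos rfl, ite_true, List.filterMap_cons]
      have h1 : pvSegs stride ms stride =
          (pvRecLens ms 1).filterMap (fun L => if L * stride > 0 then some (L * stride) else none) := by
        have := ih 1; simpa using this
      rw [h1]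
      split_ifs <;> simp
    · simp only [pvSegs, pvRecLens, hv, ite_false]
      have h1 : p * stride + stride = (p + 1) * stride := by ring
      rw [h1, ih (p + 1)]

theorem pvAddHead_zero (l : List Int) : pvAddHead 0 l = l := by
  cases l <;> simp [pvAddHead]

-- ===== VERDICT (by name: the statement is the Claim_ definition above) =====
theorem calculate_samples_per_base_spec : Claim_equal_calculate_samples_per_base := by
  intro mv_array _ hpre
  unfold Spec_calculate_samples_per_base
  match mv_array with
  | [] => exact absurd rfl hpre
  | stride :: moves =>
    have hA : calculate_samples_per_base (stride :: moves)
        = (if (moves.foldl (pvStepA stride) ([], 0)).2 > 0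
            then (moves.foldl (pvStepA stride) ([], 0)).1 ++ [(moves.foldl (pvStepA stride) ([], 0)).2]
            else (moves.foldl (pvStepA stride) ([], 0)).1) := rfl
    have hB : calculate_samples_per_base_alt (stride :: moves)
        = (pvBL moves).filterMap (fun L => if L * stride > 0 then some (L * stride) else none) := rfl
    rw [hA, hB, pvA_fold stride moves [] 0, List.nil_append]
    have hseg := pvSegs_eq_filt stride moves 0
    rw [zero_mul] at hseg
    rw [hseg, pvRecLens_eq_BL, pvAddHead_zero]
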